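-- pv_equiv track=rewrite | github.com/TohnoYouki/automatic-rigging | datasets/collate_dataset/model_resource/collate_games.py | convert_name
-- ===== SOURCE A (Python) =====
-- def convert_name(raw_name):
--     name = ''
--     for x in raw_name:
--         if (x >= 'a' and x <= 'z') or (x >= 'A' and x <= 'Z'):
--             name += x.lower()
--         elif (x >= '1' and x <= '9'):
--             name += x
--         else: name += ' '
--     name = [x + ' ' for x in name.split(' ') if x != '']
--     name = (''.join(name))[:-1]
--     return name
-- ===== SOURCE B (Python) =====
-- def convert_name(raw_name):
--     words = []
--     buf = []
--     for c in raw_name: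
--         if c.isalpha():
--             buf.append(c.lower())
--         elif '1' <= c <= '9':
--             buf.append(c)
--         elif buf:
--             words.append(''.join(buf))
--             buf = []
--     if buf:
--         words.append(''.join(buf))
--     return ' '.join(words)
-- ===== Notes on version B (the rewrite author's own statement) =====
-- stated objective: simpler
-- what changed: Single-pass tokenizer that accumulates the current word in a buffer and flushes it on separators, replacing A's three passes (build a space-filled intermediate string, split and filter it, re-join with trailing separators and chop the last character) with one loop plus a single space-joined output.
import Mathlib
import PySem

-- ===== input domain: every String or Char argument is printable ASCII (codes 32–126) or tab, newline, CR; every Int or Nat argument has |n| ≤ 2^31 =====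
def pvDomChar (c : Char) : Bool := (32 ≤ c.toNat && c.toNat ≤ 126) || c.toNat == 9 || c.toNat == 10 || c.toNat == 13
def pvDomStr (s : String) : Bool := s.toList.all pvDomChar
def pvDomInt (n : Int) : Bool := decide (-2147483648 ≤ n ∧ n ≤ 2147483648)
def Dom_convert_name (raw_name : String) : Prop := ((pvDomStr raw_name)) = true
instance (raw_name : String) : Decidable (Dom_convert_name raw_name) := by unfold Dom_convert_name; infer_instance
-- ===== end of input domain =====

-- B replaces A's three passes (classify into a space-filled string, split/filter it,
-- re-join with trailing spaces and chop the last char) by a single-pass tokenizer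
-- with a word buffer; return values are proved equal on the whole domain.

-- ===== PORT A =====
-- one step of A's `name += …` loop
def pvStepA (acc : List Char) (x : Char) : List Char :=
  if ('a' ≤ x ∧ x ≤ 'z') ∨ ('A' ≤ x ∧ x ≤ 'Z') then acc ++ [PySem.Chars.lowerChar x]
  else if '1' ≤ x ∧ x ≤ '9' then acc ++ [x]
  else acc ++ [' ']

def convert_name (raw_name : String) : String :=
  let name : List Char := raw_name.toList.foldl pvStepA []
  -- name.split(' '), keep the non-empty pieces, append ' ' to each
  let pieces := ((PySem.Chars.splitOn name [' ']).filter (fun x => x ≠ [])).map (fun x => x ++ [' '])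
  -- (''.join(pieces))[:-1]
  String.ofList (PySem.Chars.slice (PySem.Chars.join [] pieces) none (some (-1)))

-- ===== PORT B =====
-- one step of B's loop: state = (finished words, current buffer)
def pvStepB (st : List (List Char) × List Char) (c : Char) : List (List Char) × List Char :=
  if PySem.Chars.isalpha c then (st.1, st.2 ++ [PySem.Chars.lowerChar c])
  else if '1' ≤ c ∧ c ≤ '9' then (st.1, st.2 ++ [c])
  else if st.2 = [] then st else (st.1 ++ [st.2], [])

def convert_name_alt (raw_name : String) : String :=
  let r := raw_name.toList.foldl pvStepB ([], [])
  let words := if r.2 = [] then r.1 else r.1 ++ [r.2]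
  String.ofList (PySem.Chars.join [' '] words)

-- ===== PRECONDITION & SPEC =====
def Spec_convert_name (raw_name : String) (out : String) : Prop := out = convert_name_alt raw_name
instance (raw_name : String) (out : String) : Decidable (Spec_convert_name raw_name out) := by unfold Spec_convert_name; infer_instance

-- ===== CLAIM (what is proved, stated in full; the proofs are below) =====
def Claim_equal_convert_name : Prop := ∀ (raw_name : String), Dom_convert_name raw_name → Spec_convert_name raw_name (convert_name raw_name)

-- ===== LEMMAS AND PROOFS =====

-- classifier shared by both programs: `some d` = keep d in the current word, `none` = separator
def pvCls (c : Char) : Option Char :=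
  if PySem.Chars.isalpha c then some (PySem.Chars.lowerChar c)
  else if '1' ≤ c ∧ c ≤ '9' then some c else none

def pvGd (c : Char) : Char := (pvCls c).getD ' '

-- reference tokenizer
def pvToks : List Char → List Char → List (List Char)
  | cur, [] => if cur = [] then [] else [cur]
  | cur, c :: rest =>
    match pvCls c with
    | some d => pvToks (cur ++ [d]) rest
    | none => if cur = [] then pvToks [] rest else cur :: pvToks [] rest

-- reference splitter on ' '
def pvSp : List Char → List Char → List (List Char)
  | pre, [] => [pre]
  | pre, c :: rest => if c = ' ' then pre :: pvSp [] rest else pvSp (pre ++ [c]) rest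

theorem pvLe (a b : Char) : a ≤ b ↔ a.toNat ≤ b.toNat := ⟨Fin.mk_le_mk.mp, Fin.mk_le_mk.mpr⟩

theorem pvEq (a b : Char) : a = b ↔ a.toNat = b.toNat := by
  constructor
  · intro h; rw [h]
  · intro h; exact Char.ext (UInt32.toNat_inj.mp h)

theorem pvToNat_ofNat (n : Nat) (h : n.isValidChar) : (Char.ofNat n).toNat = n := by
  simp [Char.ofNat, h, Char.toNat, Char.ofNatAux]

theorem pvAlpha_iff (x : Char) :
    PySem.Chars.isalpha x = true ↔ (('a' ≤ x ∧ x ≤ 'z') ∨ ('A' ≤ x ∧ x ≤ 'Z')) := by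
  simp [PySem.Chars.isalpha, PySem.Chars.isupper, PySem.Chars.islower]
  tauto

theorem pvStepA_eq (acc : List Char) (x : Char) : pvStepA acc x = acc ++ [pvGd x] := by
  unfold pvStepA pvGd pvCls
  by_cases h : ('a' ≤ x ∧ x ≤ 'z') ∨ ('A' ≤ x ∧ x ≤ 'Z')
  · have ha : PySem.Chars.isalpha x = true := (pvAlpha_iff x).mpr h
    rw [if_pos h]
    simp [ha]
  · have ha : ¬ PySem.Chars.isalpha x = true := fun hh => h ((pvAlpha_iff x).mp hh)
    rw [if_neg h]
    by_cases hd : '1' ≤ x ∧ x ≤ '9' <;> simp [ha, hd]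

theorem pvFoldA (cs : List Char) (acc : List Char) :
    cs.foldl pvStepA acc = acc ++ cs.map pvGd := by
  induction cs generalizing acc with
  | nil => simp
  | cons c rest ih => simp [List.foldl_cons, pvStepA_eq, ih]

theorem pvGo_spec (fuel : Nat) (l cur : List Char) (acc : List (List Char)) (h : l.length < fuel) :
    PySem.Chars.splitOn.go [' '] fuel l cur acc = acc.reverse ++ pvSp cur.reverse l := by
  induction fuel generalizing l cur acc with
  | zero => omega
  | succ fuel ih =>
    cases l with
    | nil => rw [PySem.Chars.splitOn.go.eq_def]; simp [pvSp]
    | cons c rest =>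
      rw [PySem.Chars.splitOn.go.eq_def]
      show (if List.isPrefixOf [' '] (c :: rest) = true then
              PySem.Chars.splitOn.go [' '] fuel (List.drop 1 (c :: rest)) [] (cur.reverse :: acc)
            else PySem.Chars.splitOn.go [' '] fuel rest (c :: cur) acc) = _
      by_cases hc : c = ' '
      · rw [if_pos (by simp [hc, List.isPrefixOf])]
        rw [ih (List.drop 1 (c :: rest)) [] (cur.reverse :: acc) (by simp at h ⊢; omega)]
        simp [pvSp, hc]
      · rw [if_neg (by simp [List.isPrefixOf]; intro hh; exact hc hh.symm)]
        rw [ih rest (c :: cur) acc (by simp at h; omega)]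
        simp [pvSp, hc]

theorem pvSplitOn_space (s : List Char) :
    PySem.Chars.splitOn s [' '] = pvSp [] s := by
  have := pvGo_spec (s.length + 1) s [] [] (by omega)
  simpa [PySem.Chars.splitOn] using this

theorem pvGd_ne_space (c d : Char) (h : pvCls c = some d) : d ≠ ' ' := by
  have hsp : (' ' : Char).toNat = 32 := by decide
  by_cases ha : PySem.Chars.isalpha c = true
  · rw [pvCls, if_pos ha] at h
    obtain rfl : PySem.Chars.lowerChar c = d := by injection h
    rcases (pvAlpha_iff c).mp ha with hl | hu
    · have h1 : ('a' : Char).toNat ≤ c.toNat := (pvLe _ _).mp hl.1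
      have h2 : ('a' : Char).toNat = 97 := by decide
      have hnu : PySem.Chars.isupper c = false := by
        simp [PySem.Chars.isupper, pvLe]
        intro _
        omega
      rw [PySem.Chars.lowerChar, hnu]
      rw [if_neg (by simp)]
      intro he
      have h5 := (pvEq _ _).mp he
      omega
    · have h1 : ('A' : Char).toNat ≤ c.toNat := (pvLe _ _).mp hu.1
      have h2 : c.toNat ≤ ('Z' : Char).toNat := (pvLe _ _).mp hu.2
      have h3 : ('A' : Char).toNat = 65 := by decide
      have h4 : ('Z' : Char).toNat = 90 := by decide
      have hui : PySem.Chars.isupper c = true := by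
        simp [PySem.Chars.isupper]; exact ⟨hu.1, hu.2⟩
      rw [PySem.Chars.lowerChar, if_pos hui]
      intro he
      have h5 := (pvEq _ _).mp he
      have hv : (c.toNat + 32).isValidChar := by left; omega
      rw [pvToNat_ofNat _ hv, hsp] at h5
      omega
  · rw [pvCls, if_neg ha] at h
    by_cases hd : '1' ≤ c ∧ c ≤ '9'
    · rw [if_pos hd] at h
      obtain rfl : c = d := by injection h
      have h1 : ('1' : Char).toNat ≤ c.toNat := (pvLe _ _).mp hd.1
      have h2 : ('1' : Char).toNat = 49 := by decide
      intro he
      have h5 := (pvEq _ _).mp he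
      omega
    · rw [if_neg hd] at h; cases h

theorem pvFilter_sp (cs : List Char) (pre : List Char) :
    (pvSp pre (cs.map pvGd)).filter (fun x => x ≠ []) = pvToks pre cs := by
  induction cs generalizing pre with
  | nil =>
    by_cases hp : pre = [] <;> simp [pvSp, pvToks, hp, List.filter]
  | cons c rest ih =>
    simp only [List.map_cons]
    cases hc : pvCls c with
    | some d =>
      have hne : d ≠ ' ' := pvGd_ne_space c d hc
      have hg : pvGd c = d := by simp [pvGd, hc]
      rw [hg, pvSp, if_neg hne, pvToks, hc]
      exact ih (pre ++ [d])
    | none =>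
      have hg : pvGd c = ' ' := by simp [pvGd, hc]
      rw [hg, pvSp, if_pos rfl, pvToks, hc]
      by_cases hp : pre = []
      · subst hp
        rw [List.filter_cons, if_neg (by simp)]
        exact ih []
      · rw [List.filter_cons, if_pos (by simpa using hp), if_neg hp]
        rw [ih []]

theorem pvJoin_cons2 (s a b : List Char) (l : List (List Char)) :
    PySem.Chars.join s (a :: b :: l) = a ++ s ++ PySem.Chars.join s (b :: l) := by
  simp [PySem.Chars.join, List.intercalate, List.intersperse]

theorem pvDropLast_join (ws : List (List Char)) :
    (PySem.Chars.join [] (ws.map (fun x => x ++ [' ']))).dropLast = PySem.Chars.join [' '] ws := by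
  induction ws with
  | nil => simp [PySem.Chars.join, List.intercalate]
  | cons w ws ih =>
    cases ws with
    | nil => simp [PySem.Chars.join, List.intercalate, List.intersperse]
    | cons w2 ws2 =>
      rw [List.map_cons, List.map_cons, pvJoin_cons2, pvJoin_cons2]
      have hm : (w2 ++ [' ']) :: List.map (fun x => x ++ [' ']) ws2
          = List.map (fun x => x ++ [' ']) (w2 :: ws2) := by simp
      have hne : PySem.Chars.join [] ((w2 ++ [' ']) :: List.map (fun x => x ++ [' ']) ws2) ≠ [] := by
        cases ws2 with
        | nil => simp [PySem.Chars.join, List.intercalate]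
        | cons w3 ws3 =>
          rw [List.map_cons, pvJoin_cons2]
          simp
      rw [List.append_nil, List.dropLast_append_of_ne_nil hne, hm, ih]

theorem pvFoldB (cs : List Char) (ws : List (List Char)) (buf : List Char) :
    (let r := cs.foldl pvStepB (ws, buf);
     if r.2 = [] then r.1 else r.1 ++ [r.2]) = ws ++ pvToks buf cs := by
  induction cs generalizing ws buf with
  | nil =>
    by_cases hb : buf = [] <;> simp [pvToks, hb]
  | cons c rest ih =>
    simp only [List.foldl_cons]
    cases hc : pvCls c with
    | some d =>
      have hstep : pvStepB (ws, buf) c = (ws, buf ++ [d]) := by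
        by_cases ha : PySem.Chars.isalpha c = true
        · rw [pvCls, if_pos ha] at hc
          obtain rfl : PySem.Chars.lowerChar c = d := by injection hc
          simp [pvStepB, ha]
        · rw [pvCls, if_neg ha] at hc
          by_cases hd : '1' ≤ c ∧ c ≤ '9'
          · rw [if_pos hd] at hc
            obtain rfl : c = d := by injection hc
            simp [pvStepB, ha, hd]
          · rw [if_neg hd] at hc; cases hc
      rw [hstep, ih, pvToks, hc]
    | none =>
      have ha : ¬ PySem.Chars.isalpha c = true := by
        intro ha; rw [pvCls, if_pos ha] at hc; cases hc
      have hd : ¬ ('1' ≤ c ∧ c ≤ '9') := by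
        intro hd; rw [pvCls, if_neg ha, if_pos hd] at hc; cases hc
      by_cases hb : buf = []
      · have hstep : pvStepB (ws, buf) c = (ws, buf) := by
          simp [pvStepB, ha, hd, hb]
        rw [hstep, ih, pvToks, hc, if_pos hb, hb]
      · have hstep : pvStepB (ws, buf) c = (ws ++ [buf], []) := by
          simp [pvStepB, ha, hd, hb]
        rw [hstep, ih, pvToks, hc, if_neg hb]
        simp

-- ===== VERDICT (by name: the statement is the Claim_ definition above) =====
theorem convert_name_spec : Claim_equal_convert_name := by
  intro raw_name _
  show convert_name raw_name = convert_name_alt raw_name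
  unfold convert_name convert_name_alt
  simp only [PySem.Chars.slice, PySem.List.slice_to_neg_one]
  rw [pvFoldA, pvSplitOn_space, List.nil_append, pvFilter_sp, pvDropLast_join]
  have := pvFoldB raw_name.toList [] []
  simp only [List.nil_append] at this
  rw [this]
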